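-- pv_equiv track=rewrite | github.com/qutebrowser/qutebrowser | qutebrowser/keyinput/keyutils.py | _parse_keystring
-- ===== SOURCE A (Python) =====
-- from collections.abc import Iterator, Iterable, Mapping
--
-- def _parse_keystring(keystr: str) -> Iterator[str]:
--     key = ''
--     special = False
--     for c in keystr:
--         if c == '>':
--             if special:
--                 yield _parse_special_key(key)
--                 key = ''
--                 special = False
--             else:
--                 yield '>'
--                 assert not key, key
--         elif c == '<':
--             special = True
--         elif special:
--             key += c
--         else:
--             yield _parse_single_key(c)
--     if special:
--         yield '<'
--         for c in key:
--             yield _parse_single_key(c)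
--
-- def _parse_special_key(keystr: str) -> str:
--     """Normalize a keystring like Ctrl-Q to a keystring like Ctrl+Q.
--
--     Args:
--         keystr: The key combination as a string.
--
--     Return:
--         The normalized keystring.
--     """
--     keystr = keystr.lower()
--     replacements = (
--         ('control', 'ctrl'),
--         ('windows', 'meta'),
--         ('mod4', 'meta'),
--         ('command', 'meta'),
--         ('cmd', 'meta'),
--         ('super', 'meta'),
--         ('mod1', 'alt'),
--         ('less', '<'),
--         ('greater', '>'),
--     )
--     for (orig, repl) in replacements:
--         keystr = keystr.replace(orig, repl)
--
--     for mod in ['ctrl', 'meta', 'alt', 'shift', 'num']: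
--         keystr = keystr.replace(mod + '-', mod + '+')
--     return keystr
--
-- def _parse_single_key(keystr: str) -> str:
--     """Get a keystring for QKeySequence for a single key."""
--     return 'Shift+' + keystr if keystr.isupper() else keystr
-- ===== SOURCE B (Python) =====
-- # B: scans for <...> groups with str.partition instead of A's per-character state machine.
-- def _parse_keystring(keystr: str):
--     out = []
--     rest = keystr
--     while True:
--         plain, sep, rest = rest.partition('<')
--         out.extend(_parse_single_key(c) for c in plain)
--         if not sep:
--             return out
--         group, sep, rest = rest.partition('>')
--         if not sep:
--             out.append('<')
--             out.extend(_parse_single_key(c) for c in group)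
--             return out
--         out.append(_parse_special_key(group))
--
--
-- def _parse_special_key(keystr: str) -> str:
--     keystr = keystr.lower()
--     replacements = (
--         ('control', 'ctrl'),
--         ('windows', 'meta'),
--         ('mod4', 'meta'),
--         ('command', 'meta'),
--         ('cmd', 'meta'),
--         ('super', 'meta'),
--         ('mod1', 'alt'),
--         ('less', '<'),
--         ('greater', '>'),
--     )
--     for (orig, repl) in replacements:
--         keystr = keystr.replace(orig, repl)
--     for mod in ['ctrl', 'meta', 'alt', 'shift', 'num']:
--         keystr = keystr.replace(mod + '-', mod + '+')
--     return keystr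
--
--
-- def _parse_single_key(keystr: str) -> str:
--     return 'Shift+' + keystr if keystr.isupper() else keystr
-- ===== Notes on version B (the rewrite author's own statement) =====
-- stated objective: alternative
-- what changed: Replaces A's per-character generator with a special/key state machine by a loop that partitions the string at each '<' and its matching '>' with str.partition, emitting whole groups at once; Pre_ excludes keystrings with a '<' while a group is already open (malformed key sequences with no specified meaning), where A silently drops the extra '<' characters from the group text while B keeps the group verbatim -- both values defensible on a malformed corner.
-- outside the precondition, e.g. on _parse_keystring('<a<b>'): A returns ['ab'], B returns ['a<b']
import Mathlib
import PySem

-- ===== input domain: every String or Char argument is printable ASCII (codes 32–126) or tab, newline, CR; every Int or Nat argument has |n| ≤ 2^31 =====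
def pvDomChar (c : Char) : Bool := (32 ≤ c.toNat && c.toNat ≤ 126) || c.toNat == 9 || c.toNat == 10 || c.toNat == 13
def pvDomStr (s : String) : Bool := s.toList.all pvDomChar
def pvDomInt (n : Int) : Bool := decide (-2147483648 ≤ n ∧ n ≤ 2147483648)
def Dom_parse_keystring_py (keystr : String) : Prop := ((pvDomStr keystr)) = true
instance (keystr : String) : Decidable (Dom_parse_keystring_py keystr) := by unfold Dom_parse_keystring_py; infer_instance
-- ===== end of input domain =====

-- B replaces A's per-character special/key state machine by a partition-based scan over whole <...> groups
-- (objective: alternative; return value only).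

-- shared helpers: ports of _parse_single_key and _parse_special_key (identical code in Source A and Source B)
def pvSingle (c : Char) : String :=
  if PySem.Chars.isupper c then "Shift+" ++ String.mk [c] else String.mk [c]

def pvSpecial (cs : List Char) : String :=
  let s := PySem.Chars.lower cs
  let s := [("control","ctrl"), ("windows","meta"), ("mod4","meta"), ("command","meta"),
            ("cmd","meta"), ("super","meta"), ("mod1","alt"), ("less","<"), ("greater",">")].foldl
      (fun s p => PySem.Chars.replace s p.1.toList p.2.toList) s
  let s := ["ctrl", "meta", "alt", "shift", "num"].foldl
      (fun s m => PySem.Chars.replace s (m.toList ++ ['-']) (m.toList ++ ['+'])) s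
  String.mk s

-- ===== PORT A =====
-- the generator's per-character loop, state = (buffered key, special flag)
def pvAGo : List Char → List Char → Bool → List String
  | [], key, special => if special then "<" :: key.map pvSingle else []
  | c :: cs, key, special =>
    if c = '>' then
      if special then pvSpecial key :: pvAGo cs [] false
      else ">" :: pvAGo cs key special
    else if c = '<' then pvAGo cs key true
    else if special then pvAGo cs (key ++ [c]) special
    else pvSingle c :: pvAGo cs key special

def parse_keystring_py (keystr : String) : List String :=
  pvAGo keystr.toList [] false

-- ===== PORT B =====
-- Source B's loop; str.partition('<') is ported exactly as (takeWhile (≠'<'), dropWhile (≠'<')):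
-- the dropWhile result is empty iff the separator is absent, else its head is the separator.
def pvBGo (cs : List Char) : List String :=
  let plain := cs.takeWhile (· ≠ '<')
  let rest := cs.dropWhile (· ≠ '<')
  if hrest : rest = [] then plain.map pvSingle
  else
    let group := rest.tail.takeWhile (· ≠ '>')
    let rest2 := rest.tail.dropWhile (· ≠ '>')
    if rest2 = [] then
      plain.map pvSingle ++ "<" :: group.map pvSingle
    else
      plain.map pvSingle ++ pvSpecial group :: pvBGo rest2.tail
termination_by cs.length
decreasing_by
  have h1 : (cs.dropWhile (· ≠ '<')).length ≤ cs.length := cs.length_dropWhile_le _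
  have h2 : 1 ≤ (cs.dropWhile (· ≠ '<')).length := List.length_pos_of_ne_nil hrest
  have h3 : ((cs.dropWhile (· ≠ '<')).tail.dropWhile (· ≠ '>')).length ≤ (cs.dropWhile (· ≠ '<')).tail.length :=
    List.length_dropWhile_le _ _
  simp only [List.length_tail] at *
  omega

def parse_keystring_py_alt (keystr : String) : List String :=
  pvBGo keystr.toList

-- ===== PRECONDITION & SPEC =====
-- Pre_ excludes keystrings in which a '<' occurs while a group is already open (a second '<' with no
-- '>' in between): such strings are malformed key sequences with no specified meaning, on which A's
-- value (it silently drops the extra '<' characters from the group) and B's (it keeps the group text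
-- between the delimiters verbatim) are both defensible.
def Pre_parse_keystring_py (keystr : String) : Prop :=
  ∀ t ∈ keystr.toList.tails, t.head? = some '<' → '<' ∉ t.tail.takeWhile (· ≠ '>')
instance (keystr : String) : Decidable (Pre_parse_keystring_py keystr) := by
  unfold Pre_parse_keystring_py; infer_instance

def pvWitness_parse_keystring_py : String := "<Ctrl-x>a"

def Spec_parse_keystring_py (keystr : String) (out : List String) : Prop :=
  out = parse_keystring_py_alt keystr
instance (keystr : String) (out : List String) : Decidable (Spec_parse_keystring_py keystr out) := by
  unfold Spec_parse_keystring_py; infer_instance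

-- ===== CLAIM (what is proved, stated in full; the proofs are below) =====
def Claim_equal_parse_keystring_py : Prop := ∀ (keystr : String), Dom_parse_keystring_py keystr → Pre_parse_keystring_py keystr → Spec_parse_keystring_py keystr (parse_keystring_py keystr)

-- ===== LEMMAS AND PROOFS =====

-- no '<' opens while a group is already open: every suffix starting at a '<' has no '<' before the next '>'
def pvNN (cs : List Char) : Prop :=
  ∀ t, t <:+ cs → t.head? = some '<' → '<' ∉ t.tail.takeWhile (· ≠ '>')

theorem pvNN_mono {cs t : List Char} (h : t <:+ cs) (hnn : pvNN cs) : pvNN t :=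
  fun u hu => hnn u (hu.trans h)

theorem pvSingle_gt : pvSingle '>' = ">" := by decide

-- A in special mode consumes up to the next '>' (or to the end), keeping non-'<' chars in the buffer
theorem pvAGo_special (cs : List Char) (key : List Char) :
    pvAGo cs key true =
      if '>' ∈ cs then
        pvSpecial (key ++ (cs.takeWhile (· ≠ '>')).filter (· ≠ '<')) ::
          pvAGo ((cs.dropWhile (· ≠ '>')).tail) [] false
      else "<" :: (key ++ cs.filter (· ≠ '<')).map pvSingle := by
  induction cs generalizing key with
  | nil => simp [pvAGo]
  | cons c cs ih =>
    by_cases hgt : c = '>'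
    · subst hgt
      simp [pvAGo]
    · by_cases hlt : c = '<'
      · subst hlt
        rw [pvAGo]
        simp only [if_neg (by decide : ¬('<' = '>'))]
        rw [ih]
        simp [hgt, List.mem_cons]
      · rw [pvAGo]
        simp only [if_neg hgt, if_neg hlt]
        rw [ih]
        simp [hgt, hlt, List.mem_cons, Ne.symm hgt, List.append_assoc]

theorem pvBGo_eq (cs : List Char) : pvBGo cs =
    (if (cs.dropWhile (· ≠ '<')) = [] then (cs.takeWhile (· ≠ '<')).map pvSingle
     else if ((cs.dropWhile (· ≠ '<')).tail.dropWhile (· ≠ '>')) = [] then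
       (cs.takeWhile (· ≠ '<')).map pvSingle ++
         "<" :: ((cs.dropWhile (· ≠ '<')).tail.takeWhile (· ≠ '>')).map pvSingle
     else
       (cs.takeWhile (· ≠ '<')).map pvSingle ++
         pvSpecial ((cs.dropWhile (· ≠ '<')).tail.takeWhile (· ≠ '>')) ::
           pvBGo ((cs.dropWhile (· ≠ '<')).tail.dropWhile (· ≠ '>')).tail) := by
  rw [pvBGo]
  simp only [dite_eq_ite]

theorem pvBGo_cons_ne (c : Char) (cs : List Char) (h : c ≠ '<') :
    pvBGo (c :: cs) = pvSingle c :: pvBGo cs := by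
  have hc : decide (¬ c = '<') = true := by simp [h]
  rw [pvBGo_eq (c :: cs), pvBGo_eq cs]
  simp only [List.takeWhile_cons, List.dropWhile_cons, ne_eq, hc, if_true]
  by_cases hnil : cs.dropWhile (· ≠ '<') = []
  · rw [if_pos hnil, if_pos hnil, List.map_cons]
  · rw [if_neg hnil, if_neg hnil]
    by_cases h2 : (cs.dropWhile (· ≠ '<')).tail.dropWhile (· ≠ '>') = []
    · rw [if_pos h2, if_pos h2, List.map_cons, List.cons_append]
    · rw [if_neg h2, if_neg h2, List.map_cons, List.cons_append]

theorem pvBGo_cons_lt (cs : List Char) :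
    pvBGo ('<' :: cs) =
      if '>' ∈ cs then
        pvSpecial (cs.takeWhile (· ≠ '>')) :: pvBGo ((cs.dropWhile (· ≠ '>')).tail)
      else "<" :: (cs.takeWhile (· ≠ '>')).map pvSingle := by
  rw [pvBGo_eq ('<' :: cs)]
  simp only [List.takeWhile_cons, List.dropWhile_cons, ne_eq, not_true,
    decide_false, Bool.false_eq_true, if_false]
  rw [if_neg (List.cons_ne_nil _ _), List.tail_cons, List.map_nil, List.nil_append,
    List.nil_append]
  by_cases hg : '>' ∈ cs
  · have hne : cs.dropWhile (· ≠ '>') ≠ [] := by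
      intro hnil
      rw [List.dropWhile_eq_nil_iff] at hnil
      have := hnil _ hg
      simp at this
    rw [if_neg hne, if_pos hg]
  · have hnil : cs.dropWhile (· ≠ '>') = [] := by
      rw [List.dropWhile_eq_nil_iff]
      intro x hx
      simp only [ne_eq, decide_eq_true_eq]
      rintro rfl; exact hg hx
    rw [if_pos hnil, if_neg hg]

theorem pvMain (n : Nat) : ∀ cs : List Char, cs.length ≤ n → pvNN cs →
    pvAGo cs [] false = pvBGo cs := by
  induction n with
  | zero =>
    intro cs hcs _
    have : cs = [] := List.eq_nil_of_length_eq_zero (Nat.le_zero.mp hcs)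
    subst this
    rw [pvBGo_eq]; simp [pvAGo]
  | succ n ih =>
    intro cs hcs hnn
    match cs with
    | [] => rw [pvBGo_eq]; simp [pvAGo]
    | c :: cs =>
      simp only [List.length_cons, Nat.add_le_add_iff_right] at hcs
      have hsuf : cs <:+ c :: cs := List.suffix_cons c cs
      by_cases hgt : c = '>'
      · subst hgt
        rw [pvAGo, pvBGo_cons_ne _ _ (by decide), pvSingle_gt]
        have := ih cs hcs (pvNN_mono hsuf hnn)
        simp_all
      · by_cases hlt : c = '<'
        · subst hlt
          -- the group that opens here has no further '<' before its '>' (from pvNN)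
          have hng : '<' ∉ cs.takeWhile (· ≠ '>') := by
            have := hnn ('<' :: cs) (List.suffix_refl _) rfl
            simpa using this
          have hfil : (cs.takeWhile (· ≠ '>')).filter (· ≠ '<') = cs.takeWhile (· ≠ '>') := by
            rw [List.filter_eq_self]
            intro a ha
            simp only [ne_eq, decide_eq_true_eq]
            rintro rfl; exact hng ha
          rw [pvAGo]
          simp only [if_neg (by decide : ¬('<' = '>'))]
          rw [pvAGo_special, pvBGo_cons_lt]
          by_cases hg : '>' ∈ cs
          · simp only [hg, if_pos]
            have hlen : ((cs.dropWhile (· ≠ '>')).tail).length ≤ n := by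
              have h1 : (cs.dropWhile (· ≠ '>')).length ≤ cs.length :=
                cs.length_dropWhile_le (· ≠ '>')
              simp only [List.length_tail]
              omega
            have hsuf2 : (cs.dropWhile (· ≠ '>')).tail <:+ '<' :: cs :=
              ((List.tail_suffix _).trans (cs.dropWhile_suffix _)).trans
                (List.suffix_cons '<' cs)
            rw [ih _ hlen (pvNN_mono hsuf2 hnn)]
            simp only [ne_eq, decide_not] at hfil
            simp [hfil]
          · have htw : cs.takeWhile (· ≠ '>') = cs := by
              rw [List.takeWhile_eq_self_iff]
              intro x hx
              simp only [ne_eq, decide_eq_true_eq]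
              rintro rfl; exact hg hx
            simp only [hg, if_false]
            rw [htw] at hfil
            simp only [ne_eq, decide_not] at hfil htw
            simp [htw, hfil]
        · rw [pvAGo]
          simp only [if_neg hgt, if_neg hlt, Bool.false_eq_true, if_false]
          rw [pvBGo_cons_ne _ _ hlt, ih cs hcs (pvNN_mono hsuf hnn)]

-- ===== VERDICT (by name: the statement is the Claim_ definition above) =====
theorem parse_keystring_py_spec : Claim_equal_parse_keystring_py := by
  intro keystr _ hpre
  unfold Spec_parse_keystring_py parse_keystring_py parse_keystring_py_alt
  exact pvMain keystr.toList.length keystr.toList le_rfl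
    (fun t hsuf => hpre t ((List.mem_tails _ _).mpr hsuf))
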